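-- pv_equiv track=rewrite | github.com/maxenceblanc/perfect-maze | Backups/main.py | listeCloisons
-- ===== SOURCE A (Python) =====
-- def listeCloisons(matrice):
--     liste = []
--     for x in range(1, len(matrice[0])-1):
--         if x%2 == 1: # Pour les colonnes paires, on prend les lignes impaires
--             for y in range(2, len(matrice)-1, 2):
--                 liste.append((x,y))
--         else: # Pour les colonnes impaires, on prend les lignes paires
--             for y in range(1, len(matrice)-1, 2):
--                 liste.append((x,y))
--     return(liste)
-- ===== SOURCE B (Python) =====
-- def listeCloisons(matrice):
--     liste = []
--     haut = len(matrice) - 1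
--     for x in range(1, len(matrice[0]) - 1):
--         for y in range(1, haut):
--             if (x + y) % 2 == 1:
--                 liste.append((x, y))
--     return liste
-- ===== Notes on version B (the rewrite author's own statement) =====
-- stated objective: simpler
-- what changed: B replaces A's parity branch with two strided step-2 inner loops by one dense inner loop over all y with a single (x+y)%2==1 filter, keeping x-major order; Pre_ excludes only the empty matrix, on which both raise IndexError.
import Mathlib
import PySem

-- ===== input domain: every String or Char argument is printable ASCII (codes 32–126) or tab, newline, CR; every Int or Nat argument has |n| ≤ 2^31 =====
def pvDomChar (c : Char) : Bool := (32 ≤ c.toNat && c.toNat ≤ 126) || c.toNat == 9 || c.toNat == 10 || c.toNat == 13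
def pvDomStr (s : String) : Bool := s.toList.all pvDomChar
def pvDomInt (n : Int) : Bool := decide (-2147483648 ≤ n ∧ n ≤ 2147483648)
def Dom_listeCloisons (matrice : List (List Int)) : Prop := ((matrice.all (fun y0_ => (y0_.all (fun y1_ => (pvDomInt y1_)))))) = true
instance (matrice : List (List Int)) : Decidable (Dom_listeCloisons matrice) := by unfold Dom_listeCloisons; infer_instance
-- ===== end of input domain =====

-- B drops A's parity branch and strided inner loops for one dense inner loop filtered by (x+y)%2==1 (simpler, same order).

-- ===== PORT A =====
def listeCloisons (matrice : List (List Int)) : List (Int × Int) :=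
  (PySem.List.pyRange 1 (((matrice.headD []).length : Int) - 1) 1).foldl
    (fun liste x =>
      if x % 2 == 1 then
        (PySem.List.pyRange 2 ((matrice.length : Int) - 1) 2).foldl
          (fun l y => l ++ [(x, y)]) liste
      else
        (PySem.List.pyRange 1 ((matrice.length : Int) - 1) 2).foldl
          (fun l y => l ++ [(x, y)]) liste)
    []

-- ===== PORT B =====
def listeCloisons_alt (matrice : List (List Int)) : List (Int × Int) :=
  let haut : Int := (matrice.length : Int) - 1
  (PySem.List.pyRange 1 (((matrice.headD []).length : Int) - 1) 1).foldl
    (fun liste x =>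
      (PySem.List.pyRange 1 haut 1).foldl
        (fun l y => if (x + y) % 2 == 1 then l ++ [(x, y)] else l) liste)
    []

-- ===== PRECONDITION & SPEC =====
-- Pre_ excludes the empty matrix, on which Python's len(matrice[0]) raises IndexError.
def Pre_listeCloisons (matrice : List (List Int)) : Prop := matrice ≠ []
instance (matrice : List (List Int)) : Decidable (Pre_listeCloisons matrice) := by unfold Pre_listeCloisons; infer_instance
def pvWitness_listeCloisons : List (List Int) := [[0,0,0,0,0],[0,0,0,0,0],[0,0,0,0,0],[0,0,0,0,0],[0,0,0,0,0]]

def Spec_listeCloisons (matrice : List (List Int)) (out : List (Int × Int)) : Prop := out = listeCloisons_alt matrice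
instance (matrice : List (List Int)) (out : List (Int × Int)) : Decidable (Spec_listeCloisons matrice out) := by unfold Spec_listeCloisons; infer_instance

-- ===== CLAIM (what is proved, stated in full; the proofs are below) =====
def Claim_equal_listeCloisons : Prop := ∀ (matrice : List (List Int)), Dom_listeCloisons matrice → Pre_listeCloisons matrice → Spec_listeCloisons matrice (listeCloisons matrice)

-- ===== LEMMAS AND PROOFS =====

-- numbers below n with parity r, listed in order, are 2j+r for j below (n+1-r)/2
lemma parity_filter_range (n r : Nat) (hr : r < 2) :
    (List.range n).filter (fun k => k % 2 == r)
      = (List.range ((n + 1 - r) / 2)).map (fun j => 2 * j + r) := by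
  induction n with
  | zero =>
      have : (1 - r) / 2 = 0 := by omega
      simp [this]
  | succ n ih =>
      rw [List.range_succ, List.filter_append, ih]
      by_cases h : n % 2 = r
      · have h1 : (n + 1 + 1 - r) / 2 = (n + 1 - r) / 2 + 1 := by omega
        have h2 : 2 * ((n + 1 - r) / 2) + r = n := by omega
        rw [h1, List.range_succ, List.map_append]
        simp [h, h2]
      · have h1 : (n + 1 + 1 - r) / 2 = (n + 1 - r) / 2 := by omega
        rw [h1]
        simp [h]

-- the step-2 range A uses equals B's parity-filtered dense range, odd-x case
lemma key_odd (x b : Int) (hx : x % 2 = 1) :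
    PySem.List.pyRange 2 b 2
      = (PySem.List.pyRange 1 b 1).filter (fun y => (x + y) % 2 == 1) := by
  rw [PySem.List.pyRange_of_pos 2 b (by norm_num), PySem.List.pyRange_one,
      List.filter_map]
  have hcong : ∀ k ∈ List.range (b - 1).toNat,
      ((fun y => ((x + y) % 2 == 1)) ∘ (fun k : Nat => (1 : Int) + k)) k
        = (fun k : Nat => k % 2 == 1) k := by
    intro k _
    simp only [Function.comp]
    rw [Bool.eq_iff_iff]
    simp only [beq_iff_eq]
    constructor <;> intro h <;> omega
  rw [List.filter_congr hcong, parity_filter_range _ 1 (by norm_num)]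
  have hn : (if (2:Int) < b then ((b - 2 + 2 - 1) / 2).toNat else 0)
      = ((b - 1).toNat + 1 - 1) / 2 := by
    split_ifs with h <;> omega
  rw [hn, List.map_map]
  refine List.map_congr_left ?_
  intro j _
  simp only [Function.comp]
  push_cast
  ring

-- even-x case
lemma key_even (x b : Int) (hx : x % 2 = 0) :
    PySem.List.pyRange 1 b 2
      = (PySem.List.pyRange 1 b 1).filter (fun y => (x + y) % 2 == 1) := by
  rw [PySem.List.pyRange_of_pos 1 b (by norm_num), PySem.List.pyRange_one,
      List.filter_map]
  have hcong : ∀ k ∈ List.range (b - 1).toNat,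
      ((fun y => ((x + y) % 2 == 1)) ∘ (fun k : Nat => (1 : Int) + k)) k
        = (fun k : Nat => k % 2 == 0) k := by
    intro k _
    simp only [Function.comp]
    rw [Bool.eq_iff_iff]
    simp only [beq_iff_eq]
    constructor <;> intro h <;> omega
  rw [List.filter_congr hcong, parity_filter_range _ 0 (by norm_num)]
  have hn : (if (1:Int) < b then ((b - 1 + 2 - 1) / 2).toNat else 0)
      = ((b - 1).toNat + 1 - 0) / 2 := by
    split_ifs with h <;> omega
  rw [hn, List.map_map]
  refine List.map_congr_left ?_
  intro j _
  simp only [Function.comp]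
  push_cast
  ring

-- ===== VERDICT (by name: the statement is the Claim_ definition above) =====
theorem listeCloisons_spec : Claim_equal_listeCloisons := by
  intro matrice _ _
  simp only [Spec_listeCloisons, listeCloisons, listeCloisons_alt]
  apply PySem.List.foldl_congr_mem
  intro acc x _
  rw [PySem.List.foldl_append_if ((fun y => (x + y) % 2 == 1)) (fun y => (x, y))]
  by_cases hx : x % 2 = 1
  · rw [if_pos (by simp [hx]), PySem.List.foldl_append_singleton_eq_map,
        key_odd x _ hx]
  · have hx0 : x % 2 = 0 := by omega
    rw [if_neg (by simp [hx0]), PySem.List.foldl_append_singleton_eq_map,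
        key_even x _ hx0]
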